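-- pv_equiv track=rewrite | github.com/aryaanchavan1-commits/Arynoxtech_AGI | core/nlp_engine.py | _simple_qa
-- ===== SOURCE A (Python) =====
-- def _simple_qa(question: str, context: str) -> str:
--     """Simple keyword-based question answering"""
--     question_words = set(question.lower().split())
--     context_sentences = context.split('.')
--
--     # Find sentence with most question word overlap
--     best_sentence = ""
--     best_score = 0
--
--     for sentence in context_sentences:
--         sentence_words = set(sentence.lower().split())
--         score = len(question_words.intersection(sentence_words))
--         if score > best_score:
--             best_score = score
--             best_sentence = sentence
--
--     return best_sentence.strip() if best_sentence else "I couldn't find a specific answer in the context."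
-- ===== SOURCE B (Python) =====
-- def _simple_qa(question: str, context: str) -> str:
--     # Inverted scoring: precompute per-sentence word sets, then bump each
--     # sentence's score once per distinct question word it contains.
--     sentences = context.split('.')
--     word_sets = [set(s.lower().split()) for s in sentences]
--     scores = [0] * len(sentences)
--     for w in set(question.lower().split()):
--         scores = [n + 1 if w in ws else n for n, ws in zip(scores, word_sets)]
--     best_sentence = None
--     best_score = 0
--     for s, sc in zip(sentences, scores):
--         if sc > best_score:
--             best_score = sc
--             best_sentence = s
--     if best_sentence is None:
--         return "I couldn't find a specific answer in the context."
--     return best_sentence.strip()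
-- ===== Notes on version B (the rewrite author's own statement) =====
-- stated objective: alternative
-- what changed: B inverts the scoring: it precomputes every sentence's word set once, accumulates a per-sentence score array by iterating over the distinct question words (incrementing each containing sentence), and then does a separate first-wins argmax scan, instead of A's single loop computing a set intersection per sentence.
import Mathlib
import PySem

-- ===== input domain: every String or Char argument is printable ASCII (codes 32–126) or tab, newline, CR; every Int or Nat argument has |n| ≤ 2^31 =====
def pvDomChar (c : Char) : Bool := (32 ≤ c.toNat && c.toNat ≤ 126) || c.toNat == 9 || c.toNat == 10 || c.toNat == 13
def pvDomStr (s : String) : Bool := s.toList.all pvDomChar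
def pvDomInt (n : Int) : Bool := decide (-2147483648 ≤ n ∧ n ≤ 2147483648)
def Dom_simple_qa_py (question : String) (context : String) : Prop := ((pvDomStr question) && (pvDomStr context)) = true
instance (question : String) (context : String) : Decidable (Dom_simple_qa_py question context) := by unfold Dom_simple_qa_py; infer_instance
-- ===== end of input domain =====

-- B replaces A's per-sentence set-intersection loop by an inverted per-question-word
-- scoring pass over precomputed sentence word sets plus a separate argmax scan
-- (objective: alternative decomposition, same cost).

-- ===== PORT A =====
def simple_qa_py (question : String) (context : String) : String :=
  let question_words := PySem.Set.ofList (PySem.Str.split₀ (PySem.Str.lower question))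
  -- context.split('.'): the separator is the nonempty literal ".", so split? is always some
  let context_sentences := (PySem.Str.split? context ".").getD []
  let best := context_sentences.foldl
    (fun (acc : String × Nat) sentence =>
      let sentence_words := PySem.Set.ofList (PySem.Str.split₀ (PySem.Str.lower sentence))
      let score := (PySem.Set.inter question_words sentence_words).length
      if score > acc.2 then (sentence, score) else acc)
    ("", 0)
  if best.1 = "" then "I couldn't find a specific answer in the context."
  else PySem.Str.strip best.1

-- ===== PORT B =====
def simple_qa_py_alt (question : String) (context : String) : String :=
  let sentences := (PySem.Str.split? context ".").getD []
  let wordSets := sentences.map (fun s => PySem.Set.ofList (PySem.Str.split₀ (PySem.Str.lower s)))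
  let qset := PySem.Set.ofList (PySem.Str.split₀ (PySem.Str.lower question))
  -- iterating the question-word set: the resulting score list is order-independent
  let scores := qset.foldl
    (fun (sc : List Nat) w =>
      List.zipWith (fun n ws => if PySem.Set.contains ws w then n + 1 else n) sc wordSets)
    (List.replicate sentences.length 0)
  let best := (sentences.zip scores).foldl
    (fun (acc : Option String × Nat) p => if p.2 > acc.2 then (some p.1, p.2) else acc)
    (none, 0)
  match best.1 with
  | none => "I couldn't find a specific answer in the context."
  | some s => PySem.Str.strip s

-- ===== PRECONDITION & SPEC =====
def Spec_simple_qa_py (question : String) (context : String) (out : String) : Prop := out = simple_qa_py_alt question context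
instance (question : String) (context : String) (out : String) : Decidable (Spec_simple_qa_py question context out) := by unfold Spec_simple_qa_py; infer_instance

-- ===== CLAIM (what is proved, stated in full; the proofs are below) =====
def Claim_equal_simple_qa_py : Prop := ∀ (question : String) (context : String), Dom_simple_qa_py question context → Spec_simple_qa_py question context (simple_qa_py question context)

-- ===== LEMMAS AND PROOFS =====

-- the word set of a sentence, and its distinct-overlap score against q
def pvWSet (s : String) : PySem.Set String :=
  PySem.Set.ofList (PySem.Str.split₀ (PySem.Str.lower s))

def pvScore (q : List String) (s : String) : Nat :=
  q.countP (fun w => PySem.Set.contains (pvWSet s) w)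

-- A's per-sentence intersection size IS the countP score
lemma pvScore_eq (q : PySem.Set String) (s : String) :
    (PySem.Set.inter q (pvWSet s)).length = pvScore q s := by
  simp [PySem.Set.inter, pvScore, List.countP_eq_length_filter]

lemma pvScore_empty (q : List String) : pvScore q "" = 0 := by
  have h : pvWSet "" = [] := by decide
  simp [pvScore, h, PySem.Set.contains]

-- zipWith composed with itself on the same right list
lemma pvZipWith_zipWith {α β γ δ : Type} (f : γ → β → δ) (g : α → β → γ) :
    ∀ (sc : List α) (ws : List β),
      List.zipWith f (List.zipWith g sc ws) ws = List.zipWith (fun a b => f (g a b) b) sc ws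
  | [], _ => rfl
  | _ :: _, [] => rfl
  | a :: sc, b :: ws => by simp [List.zipWith, pvZipWith_zipWith f g sc ws]

-- the inverted scoring fold computes, pointwise, base + countP
lemma pvScores_fold (ws : List (PySem.Set String)) :
    ∀ (q : List String) (sc : List Nat), sc.length = ws.length →
      q.foldl (fun sc w =>
          List.zipWith (fun n t => if PySem.Set.contains t w then n + 1 else n) sc ws) sc
        = List.zipWith (fun n t => n + q.countP (fun w => PySem.Set.contains t w)) sc ws
  | [], sc, h => by
      simp only [List.foldl_nil, List.countP_nil, Nat.add_zero]
      induction sc generalizing ws with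
      | nil => cases ws <;> simp
      | cons a sc ih =>
          cases ws with
          | nil => simp at h
          | cons b ws => simp at h ⊢; exact ih ws h
  | w :: q, sc, h => by
      rw [List.foldl_cons,
        pvScores_fold ws q _ (by rw [List.length_zipWith, h, Nat.min_self]),
        pvZipWith_zipWith]
      apply List.zipWith_congr
      clear pvScores_fold
      induction sc generalizing ws with
      | nil =>
          cases ws with
          | nil => constructor
          | cons b ws => simp at h
      | cons a sc ih =>
          cases ws with
          | nil => simp at h
          | cons b ws =>
              constructor
              · by_cases hc : w ∈ b
                · simp [hc, PySem.Set.contains]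
                  omega
                · simp [hc, PySem.Set.contains]
              · exact ih ws (by simpa using h)

-- zipWith against a replicate of zeros is a map
lemma pvZipWith_replicate (f : Nat → PySem.Set String → Nat) :
    ∀ (l : List (PySem.Set String)), List.zipWith f (List.replicate l.length 0) l = l.map (f 0)
  | [] => rfl
  | a :: l => by simp [List.replicate, pvZipWith_replicate f l]

-- the two selection loops agree, given a score function vanishing on ""
lemma pvSelect (g : String → Nat) (hg : g "" = 0) (F : String) :
    ∀ (l : List String) (accA : String × Nat) (accB : Option String × Nat),
      accA.2 = accB.2 →
      (accA.2 = 0 → accA.1 = "" ∧ accB.1 = none) →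
      (0 < accA.2 → accB.1 = some accA.1 ∧ accA.1 ≠ "") →
      (if (l.foldl (fun acc s => if g s > acc.2 then (s, g s) else acc) accA).1 = ""
        then F
        else PySem.Str.strip (l.foldl (fun acc s => if g s > acc.2 then (s, g s) else acc) accA).1)
      = (match ((l.zip (l.map g)).foldl
            (fun (acc : Option String × Nat) p => if p.2 > acc.2 then (some p.1, p.2) else acc)
            accB).1 with
         | none => F
         | some s => PySem.Str.strip s)
  | [], accA, accB, h2, h0, hpos => by
      rcases Nat.eq_zero_or_pos accA.2 with hz | hp
      · obtain ⟨ha, hb⟩ := h0 hz; simp [ha, hb]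
      · obtain ⟨hb, ha⟩ := hpos hp; simp [ha, hb]
  | s :: l, accA, accB, h2, h0, hpos => by
      simp only [List.map_cons, List.zip_cons_cons, List.foldl_cons, ← h2]
      by_cases hgt : g s > accA.2
      · simp only [hgt, if_pos]
        refine pvSelect g hg F l (s, g s) (some s, g s) rfl ?_ ?_
        · intro h; omega
        · intro _
          refine ⟨rfl, ?_⟩
          intro hs
          have hs' : s = "" := hs
          rw [hs', hg] at hgt; omega
      · simp only [hgt, if_false]
        exact pvSelect g hg F l accA accB h2 h0 hpos

-- ===== VERDICT (by name: the statement is the Claim_ definition above) =====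
theorem simple_qa_py_spec : Claim_equal_simple_qa_py := by
  intro question context _
  unfold Spec_simple_qa_py simple_qa_py simple_qa_py_alt
  set q := PySem.Set.ofList (PySem.Str.split₀ (PySem.Str.lower question)) with hq
  set sents := (PySem.Str.split? context ".").getD [] with hs
  -- rewrite A's step to use pvScore
  have hA : (fun (acc : String × Nat) sentence =>
      let sentence_words := PySem.Set.ofList (PySem.Str.split₀ (PySem.Str.lower sentence))
      let score := (PySem.Set.inter q sentence_words).length
      if score > acc.2 then (sentence, score) else acc)
      = (fun (acc : String × Nat) s => if pvScore q s > acc.2 then (s, pvScore q s) else acc) := by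
    funext acc s
    simp only []
    rw [show PySem.Set.ofList (PySem.Str.split₀ (PySem.Str.lower s)) = pvWSet s from rfl,
      pvScore_eq]
  -- rewrite B's score list to a map of pvScore
  have hB : q.foldl (fun (sc : List Nat) w =>
        List.zipWith (fun n ws => if PySem.Set.contains ws w then n + 1 else n) sc
          (sents.map (fun s => PySem.Set.ofList (PySem.Str.split₀ (PySem.Str.lower s)))))
        (List.replicate sents.length 0)
      = sents.map (pvScore q) := by
    rw [show (List.replicate sents.length 0)
        = List.replicate (sents.map (fun s => PySem.Set.ofList (PySem.Str.split₀ (PySem.Str.lower s)))).length 0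
        from by rw [List.length_map],
      pvScores_fold _ q _ (by simp), pvZipWith_replicate, List.map_map]
    simp [pvScore, pvWSet, Function.comp]
  simp only [hA, hB]
  exact pvSelect (pvScore q) (pvScore_empty q) _ sents ("", 0) (none, 0) rfl
    (fun _ => ⟨rfl, rfl⟩) (fun h => by omega)
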